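-- pv_equiv track=rewrite | github.com/MrBrantCode/unitest_baseline | mut_generate/mist_train_cf/cf_33571/solution.py | parse_help_text
-- ===== SOURCE A (Python) =====
-- def parse_help_text(help_text: str) -> dict:
--     commands = {}
--     lines = help_text.split('\n')
--     command = None
--     description = ""
--     for line in lines:
--         line = line.strip()
--         if line.startswith('/'):
--             if command is not None:
--                 commands[command] = description.strip()
--             command = line
--             description = ""
--         else:
--             description += line + " "
--     if command is not None:
--         commands[command] = description.strip()
--     return commands
-- ===== SOURCE B (Python) =====
-- def _span(pred, xs):
--     """Longest prefix of xs satisfying pred, and the rest."""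
--     k = 0
--     while k < len(xs) and pred(xs[k]):
--         k += 1
--     return xs[:k], xs[k:]
--
--
-- def _is_body(line):
--     return not line.startswith('/')
--
--
-- def parse_help_text(help_text: str) -> dict:
--     lines = [l.strip() for l in help_text.split('\n')]
--     _, rest = _span(_is_body, lines)          # drop everything before the first command
--     commands = {}
--     while rest:
--         body, rest2 = _span(_is_body, rest[1:])
--         commands[rest[0]] = ' '.join(body).strip()
--         rest = rest2
--     return commands
-- ===== Notes on version B (the rewrite author's own statement) =====
-- stated objective: alternative
-- what changed: B strips all lines up front and decomposes the text into command-headed groups with a span (takeWhile/dropWhile) helper, space-joining each group's body, instead of A's single-pass state machine that threads a current-command/accumulated-description state through every line.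
import Mathlib
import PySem

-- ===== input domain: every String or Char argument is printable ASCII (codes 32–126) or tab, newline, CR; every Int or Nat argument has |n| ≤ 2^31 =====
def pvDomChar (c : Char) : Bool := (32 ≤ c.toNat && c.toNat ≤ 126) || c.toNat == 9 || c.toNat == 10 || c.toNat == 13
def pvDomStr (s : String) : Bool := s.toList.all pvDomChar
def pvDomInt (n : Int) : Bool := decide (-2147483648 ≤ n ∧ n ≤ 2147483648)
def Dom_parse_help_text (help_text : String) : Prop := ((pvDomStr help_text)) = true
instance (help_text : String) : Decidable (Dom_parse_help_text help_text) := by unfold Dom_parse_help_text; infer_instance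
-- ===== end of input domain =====

-- B replaces A's one-pass state machine by a strip-all-lines-then-group decomposition (same cost, different structure); equivalence of the RETURN value is proved on all inputs.

-- ===== PORT A =====
-- strings are handled at the PySem.Chars (List Char) level, exact per PYSEM.md;
-- Chars.splitOn is the sep ≠ "" form of str.split, here with the literal '\n'.
def parse_help_text (help_text : String) : List (String × String) :=
  let lines := PySem.Chars.splitOn help_text.toList ['\n']
  let st := lines.foldl
    (fun (s : PySem.Dict String String × Option (List Char) × List Char) line =>
      let line := PySem.Chars.strip line
      if PySem.Chars.startswith line ['/'] then
        match s.2.1 with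
        | some c => (s.1.insert (String.ofList c) (String.ofList (PySem.Chars.strip s.2.2)), some line, [])
        | none => (s.1, some line, [])
      else
        (s.1, s.2.1, s.2.2 ++ line ++ [' ']))
    (PySem.Dict.empty, none, [])
  (match st.2.1 with
   | some c => st.1.insert (String.ofList c) (String.ofList (PySem.Chars.strip st.2.2))
   | none => st.1).items

-- ===== PORT B =====
def phtIsBody (line : List Char) : Bool := !PySem.Chars.startswith line ['/']

-- Source B's while loop over `rest`: head is the command, _span splits off its body.
def phtGo : List (List Char) → PySem.Dict String String → PySem.Dict String String
  | [], commands => commands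
  | cmd :: rest, commands =>
      let body := rest.takeWhile phtIsBody
      let rest2 := rest.dropWhile phtIsBody
      phtGo rest2 (commands.insert (String.ofList cmd)
        (String.ofList (PySem.Chars.strip (PySem.Chars.join [' '] body))))
  termination_by l _ => l.length
  decreasing_by exact Nat.lt_succ_of_le (List.length_dropWhile_le _ _)

def parse_help_text_alt (help_text : String) : List (String × String) :=
  let lines := (PySem.Chars.splitOn help_text.toList ['\n']).map PySem.Chars.strip
  let rest := lines.dropWhile phtIsBody   -- second component of _span(_is_body, lines)
  (phtGo rest PySem.Dict.empty).items

-- ===== PRECONDITION & SPEC =====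
def Spec_parse_help_text (help_text : String) (out : List (String × String)) : Prop := out = parse_help_text_alt help_text
instance (help_text : String) (out : List (String × String)) : Decidable (Spec_parse_help_text help_text out) := by unfold Spec_parse_help_text; infer_instance

-- ===== CLAIM (what is proved, stated in full; the proofs are below) =====
def Claim_equal_parse_help_text : Prop := ∀ (help_text : String), Dom_parse_help_text help_text → Spec_parse_help_text help_text (parse_help_text help_text)

-- ===== LEMMAS AND PROOFS =====

-- A's loop body, with the line already stripped (proof-side restatement of the fold step).
def phtStepA (s : PySem.Dict String String × Option (List Char) × List Char) (line : List Char) :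
    PySem.Dict String String × Option (List Char) × List Char :=
  if PySem.Chars.startswith line ['/'] then
    match s.2.1 with
    | some c => (s.1.insert (String.ofList c) (String.ofList (PySem.Chars.strip s.2.2)), some line, [])
    | none => (s.1, some line, [])
  else
    (s.1, s.2.1, s.2.2 ++ line ++ [' '])

def phtFinish (s : PySem.Dict String String × Option (List Char) × List Char) :
    PySem.Dict String String :=
  match s.2.1 with
  | some c => s.1.insert (String.ofList c) (String.ofList (PySem.Chars.strip s.2.2))
  | none => s.1

-- A's per-line "description += line + ' '" accumulation over a list of lines.
def phtConcatSp (bs : List (List Char)) : List Char := (bs.map (· ++ [' '])).flatten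

theorem pht_rstrip_append_space (cs : List Char) :
    PySem.Chars.rstrip (cs ++ [' ']) = PySem.Chars.rstrip cs := by
  simp [PySem.Chars.rstrip, PySem.Chars.isspace]

theorem pht_strip_append_space (cs : List Char) :
    PySem.Chars.strip (cs ++ [' ']) = PySem.Chars.strip cs := by
  simp only [PySem.Chars.strip, PySem.Chars.lstrip, List.dropWhile_append]
  split
  · next h =>
    simp only [List.isEmpty_iff] at h
    simp [h, List.dropWhile, PySem.Chars.isspace, PySem.Chars.rstrip]
  · exact pht_rstrip_append_space _

theorem pht_concatSp_eq_join (bs : List (List Char)) (h : bs ≠ []) :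
    phtConcatSp bs = PySem.Chars.join [' '] bs ++ [' '] := by
  induction bs with
  | nil => exact absurd rfl h
  | cons b bs ih =>
    cases bs with
    | nil => simp [phtConcatSp, PySem.Chars.join, List.intercalate]
    | cons b' bs' =>
      simp only [phtConcatSp, List.map_cons, List.flatten_cons] at ih ⊢
      rw [ih (by simp), PySem.Chars.join_cons_cons]
      simp

theorem pht_strip_concatSp (bs : List (List Char)) :
    PySem.Chars.strip (phtConcatSp bs) = PySem.Chars.strip (PySem.Chars.join [' '] bs) := by
  cases bs with
  | nil => simp [phtConcatSp, PySem.Chars.join, List.intercalate]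
  | cons b bs => rw [pht_concatSp_eq_join _ (by simp), pht_strip_append_space]

theorem pht_strip_flatten (bs : List (List Char)) :
    PySem.Chars.strip (List.map (fun x => x ++ [' ']) bs).flatten
      = PySem.Chars.strip (PySem.Chars.join [' '] bs) := by
  have := pht_strip_concatSp bs
  simpa [phtConcatSp] using this

theorem pht_some_phase (L : List (List Char)) :
    ∀ (d : PySem.Dict String String) (c desc : List Char),
      phtFinish (L.foldl phtStepA (d, some c, desc)) =
        phtGo (L.dropWhile phtIsBody)
          (d.insert (String.ofList c)
            (String.ofList (PySem.Chars.strip (desc ++ phtConcatSp (L.takeWhile phtIsBody))))) := by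
  induction L with
  | nil => intro d c desc; simp [phtFinish, phtGo, phtConcatSp]
  | cons l L ih =>
    intro d c desc
    by_cases hb : phtIsBody l = true
    · have hs : PySem.Chars.startswith l ['/'] = false := by
        simpa [phtIsBody] using hb
      simp only [List.foldl_cons, List.dropWhile_cons, List.takeWhile_cons, hb, if_pos,
        phtStepA, hs, Bool.false_eq_true, if_false]
      rw [ih]
      simp [phtConcatSp, List.append_assoc]
    · have hs : PySem.Chars.startswith l ['/'] = true := by
        simp only [phtIsBody, Bool.not_eq_true'] at hb
        simpa using hb
      have hb' : phtIsBody l = false := by simp [phtIsBody, hs]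
      simp only [List.foldl_cons, List.dropWhile_cons, List.takeWhile_cons, hb',
        phtStepA, hs, if_true, Bool.false_eq_true, if_false]
      rw [ih]
      simp only [phtGo, phtConcatSp, List.map_nil, List.flatten_nil, List.append_nil,
        List.nil_append]
      rw [pht_strip_flatten]

theorem pht_none_phase (L : List (List Char)) :
    ∀ (d : PySem.Dict String String) (desc : List Char),
      phtFinish (L.foldl phtStepA (d, none, desc)) = phtGo (L.dropWhile phtIsBody) d := by
  induction L with
  | nil => intro d desc; simp [phtFinish, phtGo]
  | cons l L ih =>
    intro d desc
    by_cases hb : phtIsBody l = true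
    · have hs : PySem.Chars.startswith l ['/'] = false := by
        simpa [phtIsBody] using hb
      simp only [List.foldl_cons, List.dropWhile_cons, hb, if_pos, phtStepA, hs,
        Bool.false_eq_true, if_false]
      exact ih d _
    · have hs : PySem.Chars.startswith l ['/'] = true := by
        simp only [phtIsBody, Bool.not_eq_true'] at hb
        simpa using hb
      have hb' : phtIsBody l = false := by simp [phtIsBody, hs]
      simp only [List.foldl_cons, List.dropWhile_cons, hb', phtStepA, hs, if_true,
        Bool.false_eq_true, if_false]
      rw [pht_some_phase]
      simp only [phtGo, phtConcatSp, List.nil_append]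
      rw [pht_strip_flatten]

-- ===== VERDICT (by name: the statement is the Claim_ definition above) =====
theorem pht_A_eq (help_text : String) :
    parse_help_text help_text =
      (phtFinish ((PySem.Chars.splitOn help_text.toList ['\n']).foldl
        (fun s l => phtStepA s (PySem.Chars.strip l)) (PySem.Dict.empty, none, []))).items := rfl

theorem parse_help_text_spec : Claim_equal_parse_help_text := by
  intro help_text _
  unfold Spec_parse_help_text
  rw [pht_A_eq, ← List.foldl_map]
  exact congrArg PySem.Dict.items (pht_none_phase _ _ _)
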